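-- pv_equiv track=rewrite | github.com/1paulpo1/mathcha2tikz | archive/maintenace/formatter.py | _indent_path_continuations
-- ===== SOURCE A (Python) =====
-- def _indent_path_continuations(tikz_code: str) -> str:
--     """Indent all path continuation lines (.., --, arc) with 4 spaces."""
--     lines = tikz_code.split('\n')
--     result = []
--     for i, line in enumerate(lines):
--         if i > 0 and (line.lstrip().startswith('..') or line.lstrip().startswith('--') or line.lstrip().startswith('arc')):
--             result.append('    ' + line.lstrip())
--         else:
--             result.append(line)
--     return '\n'.join(result)
-- ===== SOURCE B (Python) =====
-- def _indent_path_continuations(tikz_code: str) -> str: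
--     """Indent all path continuation lines (.., --, arc) with 4 spaces.
--
--     Single character-level scan over the raw string instead of
--     split/enumerate/join: copy the first line verbatim, then after each
--     newline skip the line's leading whitespace and, if a continuation
--     token follows, emit 4 spaces in its place.
--     """
--     s = tikz_code
--     n = len(s)
--     out = []
--     i = 0
--     while i < n and s[i] != '\n':      # first line verbatim
--         out.append(s[i])
--         i += 1
--     while i < n:                        # s[i] == '\n'
--         out.append(s[i])
--         i += 1
--         j = i
--         while j < n and s[j] in ' \t\r\x0b\x0c':
--             j += 1
--         if s.startswith(('..', '--', 'arc'), j):
--             out.append('    ')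
--             i = j
--         while i < n and s[i] != '\n':
--             out.append(s[i])
--             i += 1
--     return ''.join(out)
-- ===== Notes on version B (the rewrite author's own statement) =====
-- stated objective: alternative
-- what changed: Replaces A's split(' ')/enumerate/lstrip-per-line/join pipeline by a single character-level scan of the raw string that copies the first line verbatim and, after each newline, skips leading whitespace and substitutes 4 spaces when a continuation token ('..', '--', 'arc') follows.
import Mathlib
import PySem

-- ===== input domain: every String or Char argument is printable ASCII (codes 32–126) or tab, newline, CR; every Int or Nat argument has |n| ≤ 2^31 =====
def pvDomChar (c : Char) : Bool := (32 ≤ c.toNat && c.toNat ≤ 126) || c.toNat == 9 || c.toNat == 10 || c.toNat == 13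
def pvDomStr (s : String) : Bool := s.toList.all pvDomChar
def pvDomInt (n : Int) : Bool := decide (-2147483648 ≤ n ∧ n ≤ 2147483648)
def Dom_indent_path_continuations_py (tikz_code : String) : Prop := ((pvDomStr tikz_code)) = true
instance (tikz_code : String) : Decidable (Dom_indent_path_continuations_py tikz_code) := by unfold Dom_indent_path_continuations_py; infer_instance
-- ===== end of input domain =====

-- B replaces A's split/enumerate/join over lines by a single character-level scan of the raw
-- string (objective: alternative — one pass, no intermediate list of lines).

-- ===== PORT A =====
-- A: lines = tikz_code.split('\n'); for i, line in enumerate(lines): indent continuation lines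
-- (i > 0 and lstrip startswith '..'/'--'/'arc'); '\n'.join(result).
def indent_path_continuations_py (tikz_code : String) : String :=
  let lines := PySem.Chars.splitOn tikz_code.toList ['\n']
  let result := (PySem.List.enumerate lines).foldl (fun acc p =>
    if 0 < p.1 ∧ (PySem.Chars.startswith (PySem.Chars.lstrip p.2) ['.', '.']
        || PySem.Chars.startswith (PySem.Chars.lstrip p.2) ['-', '-']
        || PySem.Chars.startswith (PySem.Chars.lstrip p.2) ['a', 'r', 'c']) = true
    then acc ++ [' ' :: ' ' :: ' ' :: ' ' :: PySem.Chars.lstrip p.2]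
    else acc ++ [p.2]) ([] : List (List Char))
  String.mk (PySem.Chars.join ['\n'] result)

-- ===== PORT B =====
-- Source B's whitespace set ' \t\r\x0b\x0c' (membership test, char by char)
def pvIsWS (c : Char) : Bool := c == ' ' || c == '\t' || c == '\r' || c == '\x0b' || c == '\x0c'

-- Source B's s.startswith(('..', '--', 'arc'), j), applied to the suffix starting at j
def pvCont (t : List Char) : Bool :=
  PySem.Chars.startswith t ['.', '.'] || PySem.Chars.startswith t ['-', '-']
    || PySem.Chars.startswith t ['a', 'r', 'c']

-- Source B's copy loop "while i < n and s[i] != '\n'": (chars copied, rest from the '\n')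
def pvBreakNL : List Char → List Char × List Char
  | [] => ([], [])
  | c :: cs =>
    if c == '\n' then ([], c :: cs)
    else
      let p := pvBreakNL cs
      (c :: p.1, p.2)

theorem pvBreakNL_snd_length_le (s : List Char) : (pvBreakNL s).2.length ≤ s.length := by
  induction s with
  | nil => simp [pvBreakNL]
  | cons c cs ih =>
    by_cases h : c = '\n' <;> simp [pvBreakNL, h] <;> omega

-- Source B's outer loop: input starts at a '\n' (or is empty); emit it, skip leading whitespace,
-- test for a continuation token, copy the rest of the line, recurse.
def pvScan : List Char → List Char
  | [] => []
  | c :: r =>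
    let j := List.dropWhile pvIsWS r
    if pvCont j then
      let p := pvBreakNL j
      c :: ' ' :: ' ' :: ' ' :: ' ' :: (p.1 ++ pvScan p.2)
    else
      let p := pvBreakNL r
      c :: (p.1 ++ pvScan p.2)
termination_by s => s.length
decreasing_by
  · have h1 := pvBreakNL_snd_length_le (List.dropWhile pvIsWS r)
    have h2 := List.length_dropWhile_le (p := pvIsWS) (l := r)
    simp only [List.length_cons]; omega
  · have h1 := pvBreakNL_snd_length_le r
    simp only [List.length_cons]; omega

def indent_path_continuations_py_alt (tikz_code : String) : String :=
  let p := pvBreakNL tikz_code.toList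
  String.mk (p.1 ++ pvScan p.2)

-- ===== PRECONDITION & SPEC =====
def Spec_indent_path_continuations_py (tikz_code : String) (out : String) : Prop := out = indent_path_continuations_py_alt tikz_code
instance (tikz_code : String) (out : String) : Decidable (Spec_indent_path_continuations_py tikz_code out) := by unfold Spec_indent_path_continuations_py; infer_instance

-- ===== CLAIM (what is proved, stated in full; the proofs are below) =====
def Claim_equal_indent_path_continuations_py : Prop := ∀ (tikz_code : String), Dom_indent_path_continuations_py tikz_code → Spec_indent_path_continuations_py tikz_code (indent_path_continuations_py tikz_code)

-- ===== LEMMAS AND PROOFS =====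

-- A's per-line condition and transformation (proof helpers)
def pvCondA (l : List Char) : Bool :=
  PySem.Chars.startswith (PySem.Chars.lstrip l) ['.', '.']
    || PySem.Chars.startswith (PySem.Chars.lstrip l) ['-', '-']
    || PySem.Chars.startswith (PySem.Chars.lstrip l) ['a', 'r', 'c']

def pvGA (l : List Char) : List Char :=
  if pvCondA l then ' ' :: ' ' :: ' ' :: ' ' :: PySem.Chars.lstrip l else l

theorem pv_modifyHead_fun_id {α : Type} (l : List α) : List.modifyHead (fun x => x) l = l := by
  cases l <;> rfl

-- split on '\n' expressed through pvBreakNL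
def pvSplitNL (s : List Char) : List (List Char) :=
  match h : (pvBreakNL s).2 with
  | [] => [(pvBreakNL s).1]
  | _ :: r => (pvBreakNL s).1 :: pvSplitNL r
termination_by s.length
decreasing_by
  have h1 := pvBreakNL_snd_length_le s
  rw [h] at h1
  simp at h1
  omega

def pvTailLines : List Char → List (List Char)
  | [] => []
  | _ :: r => pvSplitNL r

theorem pvBreakNL_spec (s : List Char) :
    s = (pvBreakNL s).1 ++ (pvBreakNL s).2 ∧ '\n' ∉ (pvBreakNL s).1 ∧
      ((pvBreakNL s).2 = [] ∨ (pvBreakNL s).2.head? = some '\n') := by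
  induction s with
  | nil => simp [pvBreakNL]
  | cons c cs ih =>
    by_cases h : c = '\n'
    · subst h; simp [pvBreakNL]
    · obtain ⟨h1, h2, h3⟩ := ih
      simp [pvBreakNL, h]
      exact ⟨h1, ⟨fun e => h e.symm, h2⟩, h3⟩

theorem pvBreakNL_append (a b : List Char) (ha : '\n' ∉ a)
    (hb : b = [] ∨ b.head? = some '\n') : pvBreakNL (a ++ b) = (a, b) := by
  induction a with
  | nil =>
    rcases hb with hb | hb
    · simp [hb, pvBreakNL]
    · cases b with
      | nil => simp at hb
      | cons x xs => simp at hb; subst hb; simp [pvBreakNL]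
  | cons c cs ih =>
    simp only [List.mem_cons, not_or] at ha
    have hc : (c == '\n') = false := by
      simp only [beq_eq_false_iff_ne, ne_eq]
      exact fun e => ha.1 e.symm
    simp [pvBreakNL, hc, ih ha.2]

theorem pv_char_ws (c : Char) (h : pvDomChar c = true) (h2 : c ≠ '\n') :
    PySem.Chars.isspace c = pvIsWS c := by
  have key : ∀ d : Char, (c = d) ↔ (c.toNat = d.toNat) :=
    fun d => ⟨fun h => by rw [h], fun h => Char.ext (UInt32.toNat_inj.mp h)⟩
  have h10 : c.toNat ≠ 10 := fun e => h2 ((key '\n').mpr (by simpa using e))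
  simp only [pvDomChar, Bool.or_eq_true, Bool.and_eq_true, decide_eq_true_eq, beq_iff_eq] at h
  rw [Bool.eq_iff_iff]
  simp only [PySem.Chars.isspace, pvIsWS, Bool.or_eq_true, Bool.and_eq_true, decide_eq_true_eq,
    beq_iff_eq, key,
    show (' ').toNat = 32 from rfl, show ('\t').toNat = 9 from rfl, show ('\r').toNat = 13 from rfl,
    show ('\x0b').toNat = 11 from rfl, show ('\x0c').toNat = 12 from rfl]
  omega

theorem pv_lstrip_eq (l : List Char) (hd : ∀ c ∈ l, pvDomChar c = true) (hn : '\n' ∉ l) :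
    PySem.Chars.lstrip l = List.dropWhile pvIsWS l := by
  induction l with
  | nil => simp [PySem.Chars.lstrip]
  | cons c cs ih =>
    simp only [List.mem_cons, not_or] at hn
    have hc := pv_char_ws c (hd c (by simp)) (fun e => hn.1 e.symm)
    simp only [PySem.Chars.lstrip] at *
    rw [List.dropWhile_cons, List.dropWhile_cons, hc]
    cases hws : pvIsWS c
    · simp
    · simp only [if_true]
      exact ih (fun d hdm => hd d (List.mem_cons_of_mem _ hdm)) hn.2

theorem pv_prefix_boundary (pat t b : List Char) (hp : '\n' ∉ pat)
    (hb : b = [] ∨ b.head? = some '\n') :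
    List.isPrefixOf pat (t ++ b) = List.isPrefixOf pat t := by
  induction pat generalizing t with
  | nil => simp [List.isPrefixOf]
  | cons c ps ih =>
    cases t with
    | nil =>
      simp only [List.nil_append]
      rcases hb with hb | hb
      · simp [hb]
      · cases b with
        | nil => simp at hb
        | cons x xs =>
          simp at hb; subst hb
          simp at hp
          simp [List.isPrefixOf]
          intro h; exact absurd h.symm hp.1
    | cons d ts =>
      simp at hp
      simp [List.isPrefixOf, ih ts hp.2]

theorem pv_cont_boundary (t b : List Char) (hb : b = [] ∨ b.head? = some '\n') :
    pvCont (t ++ b) = pvCont t := by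
  simp [pvCont, PySem.Chars.startswith,
    pv_prefix_boundary ['.', '.'] t b (by decide) hb,
    pv_prefix_boundary ['-', '-'] t b (by decide) hb,
    pv_prefix_boundary ['a', 'r', 'c'] t b (by decide) hb]

theorem pvSplitNL_eq (s : List Char) :
    pvSplitNL s = (pvBreakNL s).1 :: pvTailLines (pvBreakNL s).2 := by
  rw [pvSplitNL]
  cases h : (pvBreakNL s).2 with
  | nil => simp [pvTailLines]
  | cons x r => simp [pvTailLines]

theorem pv_go_eq (fuel : Nat) (l cur : List Char) (acc : List (List Char))
    (h : l.length ≤ fuel) :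
    PySem.Chars.splitOn.go ['\n'] fuel l cur acc
      = acc.reverse ++ (pvSplitNL l).modifyHead (cur.reverse ++ ·) := by
  induction fuel generalizing l cur acc with
  | zero =>
    have hl : l = [] := by cases l <;> simp_all
    subst hl
    rw [PySem.Chars.splitOn.go]
    simp [pvSplitNL_eq, pvBreakNL, pvTailLines]
  | succ f ih =>
    cases l with
    | nil =>
      have e : PySem.Chars.splitOn.go ['\n'] (f + 1) [] cur acc = (cur.reverse :: acc).reverse := by
        simp [PySem.Chars.splitOn.go]
      rw [e, pvSplitNL_eq]
      simp [pvBreakNL, pvTailLines]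
    | cons c rest =>
      rw [PySem.Chars.splitOn.go]
      by_cases hc : c = '\n'
      · subst hc
        have hpre : List.isPrefixOf ['\n'] ('\n' :: rest) = true := by
          simp [List.isPrefixOf]
        rw [if_pos hpre]
        rw [ih _ _ _ (by simpa using Nat.le_of_succ_le_succ h)]
        rw [pvSplitNL_eq ('\n' :: rest)]
        simp [pvBreakNL, pvTailLines, pv_modifyHead_fun_id]
      · have hpre : List.isPrefixOf ['\n'] (c :: rest) = false := by
          simp [List.isPrefixOf]
          exact fun e => hc e.symm
        rw [if_neg (by simp [hpre])]
        rw [ih _ _ _ (by simpa using Nat.le_of_succ_le_succ h)]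
        rw [pvSplitNL_eq (c :: rest), pvSplitNL_eq rest]
        have hb : (c == '\n') = false := by
          simp only [beq_eq_false_iff_ne, ne_eq]; exact hc
        simp [pvBreakNL, hb, pvTailLines]

theorem pv_splitOn_eq (s : List Char) : PySem.Chars.splitOn s ['\n'] = pvSplitNL s := by
  rw [PySem.Chars.splitOn, pv_go_eq (s.length + 1) s [] [] (by omega)]
  simp [pv_modifyHead_fun_id]

theorem pv_scan_flat (n : Nat) (r : List Char) (hl : r.length ≤ n)
    (hd : ∀ c ∈ r, pvDomChar c = true) (hh : r = [] ∨ r.head? = some '\n') :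
    pvScan r = (pvTailLines r).flatMap (fun l => '\n' :: pvGA l) := by
  induction n generalizing r with
  | zero =>
    have : r = [] := by cases r <;> simp_all
    subst this
    simp [pvScan, pvTailLines]
  | succ n ih =>
    cases r with
    | nil => simp [pvScan, pvTailLines]
    | cons c r' =>
      have hc : c = '\n' := by
        rcases hh with hh | hh
        · simp at hh
        · simp only [List.head?_cons, Option.some.injEq] at hh
          exact hh
      subst hc
      obtain ⟨hsplit, hnl, htl⟩ := pvBreakNL_spec r'
      have hd' : ∀ d ∈ r', pvDomChar d = true :=
        fun d hm => hd d (List.mem_cons_of_mem _ hm)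
      have hdp1 : ∀ d ∈ (pvBreakNL r').1, pvDomChar d = true := by
        intro d hm
        exact hd' d (by rw [hsplit]; exact List.mem_append_left _ hm)
      have hdp2 : ∀ d ∈ (pvBreakNL r').2, pvDomChar d = true := by
        intro d hm
        exact hd' d (by rw [hsplit]; exact List.mem_append_right _ hm)
      have hlst : PySem.Chars.lstrip (pvBreakNL r').1
          = List.dropWhile pvIsWS (pvBreakNL r').1 := pv_lstrip_eq _ hdp1 hnl
      have hp2drop : List.dropWhile pvIsWS (pvBreakNL r').2 = (pvBreakNL r').2 := by
        rcases htl with h0 | h0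
        · rw [h0]; rfl
        · cases h2 : (pvBreakNL r').2 with
          | nil => rfl
          | cons x xs =>
            rw [h2] at h0
            simp at h0
            subst h0
            rw [List.dropWhile_cons]
            simp [pvIsWS]
      have hdrop : List.dropWhile pvIsWS r'
          = List.dropWhile pvIsWS (pvBreakNL r').1 ++ (pvBreakNL r').2 := by
        conv_lhs => rw [hsplit]
        rw [List.dropWhile_append]
        by_cases he : (List.dropWhile pvIsWS (pvBreakNL r').1).isEmpty
        · rw [if_pos he, hp2drop]
          simp only [List.isEmpty_iff] at he
          rw [he, List.nil_append]
        · rw [if_neg he]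
      have hnt : '\n' ∉ List.dropWhile pvIsWS (pvBreakNL r').1 :=
        fun hm => hnl ((List.dropWhile_sublist _).mem hm)
      have hcont : pvCont (List.dropWhile pvIsWS (pvBreakNL r').1 ++ (pvBreakNL r').2)
          = pvCont (List.dropWhile pvIsWS (pvBreakNL r').1) := pv_cont_boundary _ _ htl
      have hlen2 : (pvBreakNL r').2.length ≤ n := by
        have h1 := pvBreakNL_snd_length_le r'
        simp at hl
        omega
      have hih := ih (pvBreakNL r').2 hlen2 hdp2 htl
      have hga : pvGA (pvBreakNL r').1
          = if pvCont (List.dropWhile pvIsWS (pvBreakNL r').1) = true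
            then ' ' :: ' ' :: ' ' :: ' ' :: List.dropWhile pvIsWS (pvBreakNL r').1
            else (pvBreakNL r').1 := by
        unfold pvGA pvCondA pvCont
        rw [hlst]
      rw [pvScan]
      simp only [hdrop, hcont]
      have htail : pvTailLines ('\n' :: r') = (pvBreakNL r').1 :: pvTailLines (pvBreakNL r').2 := by
        show pvSplitNL r' = _
        exact pvSplitNL_eq r'
      rw [htail]
      by_cases hcd : pvCont (List.dropWhile pvIsWS (pvBreakNL r').1) = true
      · rw [if_pos hcd]
        rw [pvBreakNL_append _ _ hnt htl]
        simp only [List.flatMap_cons, hga, if_pos hcd, hih]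
        simp
      · rw [if_neg hcd]
        simp only [List.flatMap_cons, hga, if_neg hcd, hih]
        simp

-- the enumerate loop: index 0 keeps the line, indices ≥ 1 apply pvGA
theorem pv_enum_map (ls : List (List Char)) (k : Int) (hk : 1 ≤ k) :
    (PySem.List.enumerate ls k).map (fun p =>
      if 0 < p.1 ∧ (PySem.Chars.startswith (PySem.Chars.lstrip p.2) ['.', '.']
          || PySem.Chars.startswith (PySem.Chars.lstrip p.2) ['-', '-']
          || PySem.Chars.startswith (PySem.Chars.lstrip p.2) ['a', 'r', 'c']) = true
      then ' ' :: ' ' :: ' ' :: ' ' :: PySem.Chars.lstrip p.2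
      else p.2) = ls.map pvGA := by
  induction ls generalizing k with
  | nil => simp [PySem.List.enumerate]
  | cons a ls ih =>
    have h0 : (0 : Int) < k := by omega
    simp only [PySem.List.enumerate, List.map_cons, ih (k + 1) (by omega)]
    congr 1
    simp only [h0, true_and]
    unfold pvGA pvCondA
    split_ifs with h1 h2 h2 <;> simp_all

theorem pv_join_flat (a : List Char) (ls : List (List Char)) :
    PySem.Chars.join ['\n'] (a :: ls.map pvGA) = a ++ ls.flatMap (fun l => '\n' :: pvGA l) := by
  induction ls generalizing a with
  | nil => simp [PySem.Chars.join_singleton]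
  | cons b ls ih =>
    rw [List.map_cons, PySem.Chars.join_cons_cons, List.flatMap_cons]
    rw [ih]
    simp

-- ===== VERDICT (by name: the statement is the Claim_ definition above) =====
theorem indent_path_continuations_py_spec : Claim_equal_indent_path_continuations_py := by
  intro s hdom
  unfold Spec_indent_path_continuations_py
  unfold indent_path_continuations_py indent_path_continuations_py_alt
  have hdom' : ∀ d ∈ s.toList, pvDomChar d = true := by
    intro d hm
    exact List.all_eq_true.mp hdom d hm
  obtain ⟨hsplit, hnl, htl⟩ := pvBreakNL_spec s.toList
  have hdp2 : ∀ d ∈ (pvBreakNL s.toList).2, pvDomChar d = true := by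
    intro d hm
    exact hdom' d (by rw [hsplit]; exact List.mem_append_right _ hm)
  have hbody : (fun (acc : List (List Char)) (p : Int × List Char) =>
      if 0 < p.1 ∧ (PySem.Chars.startswith (PySem.Chars.lstrip p.2) ['.', '.']
          || PySem.Chars.startswith (PySem.Chars.lstrip p.2) ['-', '-']
          || PySem.Chars.startswith (PySem.Chars.lstrip p.2) ['a', 'r', 'c']) = true
      then acc ++ [' ' :: ' ' :: ' ' :: ' ' :: PySem.Chars.lstrip p.2]
      else acc ++ [p.2])
    = (fun acc p => acc ++ [if 0 < p.1 ∧ (PySem.Chars.startswith (PySem.Chars.lstrip p.2) ['.', '.']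
          || PySem.Chars.startswith (PySem.Chars.lstrip p.2) ['-', '-']
          || PySem.Chars.startswith (PySem.Chars.lstrip p.2) ['a', 'r', 'c']) = true
      then ' ' :: ' ' :: ' ' :: ' ' :: PySem.Chars.lstrip p.2
      else p.2]) := by
    funext acc p
    split_ifs <;> rfl
  simp only [hbody, PySem.List.foldl_append_singleton_eq_map, List.nil_append]
  rw [pv_splitOn_eq, pvSplitNL_eq]
  simp only [PySem.List.enumerate, List.map_cons, zero_add]
  rw [pv_enum_map _ 1 le_rfl]
  have hf0 : (if (0:Int) < 0 ∧ (PySem.Chars.startswith (PySem.Chars.lstrip (pvBreakNL s.toList).1) ['.', '.']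
          || PySem.Chars.startswith (PySem.Chars.lstrip (pvBreakNL s.toList).1) ['-', '-']
          || PySem.Chars.startswith (PySem.Chars.lstrip (pvBreakNL s.toList).1) ['a', 'r', 'c']) = true
      then ' ' :: ' ' :: ' ' :: ' ' :: PySem.Chars.lstrip (pvBreakNL s.toList).1
      else (pvBreakNL s.toList).1) = (pvBreakNL s.toList).1 := by
    rw [if_neg]
    simp
  rw [hf0, pv_join_flat]
  rw [pv_scan_flat ((pvBreakNL s.toList).2.length) _ le_rfl hdp2 htl]
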